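-- pv_equiv track=rewrite | github.com/hagrace4/ml-pipeline-deployment | services/data_ingestion/service.py | _dtypes_compatible
-- ===== SOURCE A (Python) =====
-- def _dtypes_compatible(actual: str, expected: str) -> bool:
--     """Check if actual dtype is compatible with expected dtype.
--
--     Args:
--         actual: Actual dtype string
--         expected: Expected dtype string
--
--     Returns:
--         True if compatible, False otherwise
--     """
--     # Normalize dtype strings
--     actual = actual.lower()
--     expected = expected.lower()
--
--     # Exact match
--     if actual == expected:
--         return True
--
--     # Compatible numeric types
--     numeric_types = {
--         "float": ["float64", "float32", "float16"],
--         "int": ["int64", "int32", "int16", "int8", "uint64", "uint32", "uint16", "uint8"],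
--     }
--
--     for base_type, compatible in numeric_types.items():
--         if expected in compatible and actual in compatible:
--             return True
--
--     # Object/string compatibility
--     if expected in ["object", "string"] and actual in ["object", "string"]:
--         return True
--
--     return False
-- ===== SOURCE B (Python) =====
-- def _family(s: str):
--     """Parse a normalized dtype string into its compatibility family, or None."""
--     if s in ("object", "string"):
--         return "obj"
--     # split s into an alphabetic base and a trailing bit-width
--     i = len(s)
--     while i > 0 and s[i - 1].isdigit():
--         i -= 1
--     base, width = s[:i], s[i:]
--     if base == "float" and width in ("16", "32", "64"):
--         return "float"
--     if base in ("int", "uint") and width in ("8", "16", "32", "64"):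
--         return "int"
--     return None
--
--
-- def _dtypes_compatible(actual: str, expected: str) -> bool:
--     """Check if actual dtype is compatible with expected dtype."""
--     actual = actual.lower()
--     expected = expected.lower()
--     if actual == expected:
--         return True
--     fa = _family(actual)
--     return fa is not None and fa == _family(expected)
-- ===== Notes on version B (the rewrite author's own statement) =====
-- stated objective: alternative
-- what changed: B parses each dtype string into an alphabetic base plus trailing bit-width (scanning digits from the end) and compares the derived families, instead of A's membership scan over hard-coded compatibility lists plus a separate object/string branch.
import Mathlib
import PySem

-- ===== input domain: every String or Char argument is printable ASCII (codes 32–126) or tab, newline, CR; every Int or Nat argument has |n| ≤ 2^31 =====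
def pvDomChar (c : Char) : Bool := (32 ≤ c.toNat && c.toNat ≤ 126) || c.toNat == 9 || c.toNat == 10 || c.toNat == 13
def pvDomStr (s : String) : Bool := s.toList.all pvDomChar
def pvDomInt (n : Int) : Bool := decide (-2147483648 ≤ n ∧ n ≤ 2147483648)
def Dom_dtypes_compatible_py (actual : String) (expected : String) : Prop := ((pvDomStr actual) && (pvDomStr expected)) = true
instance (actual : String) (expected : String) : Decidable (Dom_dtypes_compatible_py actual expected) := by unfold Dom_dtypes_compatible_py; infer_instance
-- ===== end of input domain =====

-- B parses each dtype string into base+bit-width (scanning trailing digits) and compares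
-- families, instead of A's scan over fixed compatibility lists (alternative decomposition).

-- ===== PORT A =====
-- the numeric_types dict of A, as a literal association list (insertion order)
def pvNumericTypes : List (String × List String) :=
  [("float", ["float64", "float32", "float16"]),
   ("int", ["int64", "int32", "int16", "int8", "uint64", "uint32", "uint16", "uint8"])]

-- the 'for base_type, compatible in numeric_types.items(): if … return True' loop
def pvNumLoop (items : List (String × List String)) (actual expected : String) : Bool :=
  match items with
  | [] => false
  | (_, compatible) :: rest =>
      if compatible.contains expected && compatible.contains actual then true
      else pvNumLoop rest actual expected

def dtypes_compatible_py (actual : String) (expected : String) : Bool :=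
  let actual := PySem.Str.lower actual
  let expected := PySem.Str.lower expected
  if actual == expected then true
  else if pvNumLoop pvNumericTypes actual expected then true
  else if (["object", "string"] : List String).contains expected
          && (["object", "string"] : List String).contains actual then true
  else false

-- ===== PORT B =====
-- Source B's 'while i > 0 and s[i-1].isdigit(): i -= 1' counts trailing digits:
-- ported as a recursion counting leading digits of the reversed character list
def pvTrailDigits : List Char → Nat
  | [] => 0
  | c :: rest => if PySem.Chars.isdigit c then pvTrailDigits rest + 1 else 0

-- Source B's _family: parse a normalized dtype string into its compatibility family
def pvFamily (s : String) : Option String :=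
  if s == "object" || s == "string" then some "obj"
  else
    let cs := s.toList
    let i := cs.length - pvTrailDigits cs.reverse
    let base := String.ofList (cs.take i)
    let width := String.ofList (cs.drop i)
    if base == "float" && (["16", "32", "64"] : List String).contains width then some "float"
    else if (base == "int" || base == "uint")
            && (["8", "16", "32", "64"] : List String).contains width then some "int"
    else none

def dtypes_compatible_py_alt (actual : String) (expected : String) : Bool :=
  let actual := PySem.Str.lower actual
  let expected := PySem.Str.lower expected
  if actual == expected then true
  else
    match pvFamily actual with
    | none => false
    | some fa => pvFamily expected == some fa

-- ===== PRECONDITION & SPEC =====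
def Spec_dtypes_compatible_py (actual : String) (expected : String) (out : Bool) : Prop := out = dtypes_compatible_py_alt actual expected
instance (actual : String) (expected : String) (out : Bool) : Decidable (Spec_dtypes_compatible_py actual expected out) := by unfold Spec_dtypes_compatible_py; infer_instance

-- ===== CLAIM (what is proved, stated in full; the proofs are below) =====
def Claim_equal_dtypes_compatible_py : Prop := ∀ (actual : String) (expected : String), Dom_dtypes_compatible_py actual expected → Spec_dtypes_compatible_py actual expected (dtypes_compatible_py actual expected)

-- ===== LEMMAS AND PROOFS =====
-- all 13 dtype strings that occur in either version
def pvAllKeys : List String :=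
  ["float64", "float32", "float16", "int64", "int32", "int16", "int8",
   "uint64", "uint32", "uint16", "uint8", "object", "string"]

-- if B's parser assigns a family, the string is one of the 13 known dtype strings
theorem pv_family_some_mem (s : String) (f : String) (h : pvFamily s = some f) :
    s ∈ pvAllKeys := by
  by_cases hobj : (s == "object" || s == "string") = true
  · rcases Bool.or_eq_true_iff.mp hobj with h' | h' <;>
      simp_all [pvAllKeys, beq_iff_eq]
  · simp only [pvFamily, hobj, Bool.false_eq_true, if_false] at h
    set i := s.toList.length - pvTrailDigits s.toList.reverse with hi
    have key : s.toList = s.toList.take i ++ s.toList.drop i :=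
      (List.take_append_drop i s.toList).symm
    by_cases h1 : (String.ofList (s.toList.take i) == "float"
        && (["16", "32", "64"] : List String).contains (String.ofList (s.toList.drop i))) = true
    · obtain ⟨hb, hw⟩ := Bool.and_eq_true_iff.mp h1
      have hbl : s.toList.take i = "float".toList := by
        have := congrArg String.toList (beq_iff_eq.mp hb)
        simpa [String.toList_ofList] using this
      rw [hbl] at key
      have hwD : (String.ofList (s.toList.drop i)).toList = s.toList.drop i :=
        String.toList_ofList
      simp only [List.contains_eq_mem, List.mem_cons, List.not_mem_nil, or_false,
        decide_eq_true_eq] at hw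
      rcases hw with hw | hw | hw <;>
        (rw [hw] at hwD; rw [← hwD] at key;
         simp only [pvAllKeys, List.mem_cons, List.not_mem_nil, or_false,
           ← String.toList_inj, key];
         decide)
    · by_cases h2 : ((String.ofList (s.toList.take i) == "int"
            || String.ofList (s.toList.take i) == "uint")
          && (["8", "16", "32", "64"] : List String).contains (String.ofList (s.toList.drop i))) = true
      · obtain ⟨hb, hw⟩ := Bool.and_eq_true_iff.mp h2
        have hwD : (String.ofList (s.toList.drop i)).toList = s.toList.drop i :=
          String.toList_ofList
        simp only [List.contains_eq_mem, List.mem_cons, List.not_mem_nil, or_false,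
          decide_eq_true_eq] at hw
        rcases Bool.or_eq_true_iff.mp hb with hb' | hb' <;>
          (have hbl := congrArg String.toList (beq_iff_eq.mp hb');
           rw [String.toList_ofList] at hbl; rw [hbl] at key) <;>
          (rcases hw with hw | hw | hw | hw <;>
            (rw [hw] at hwD; rw [← hwD] at key;
             simp only [pvAllKeys, List.mem_cons, List.not_mem_nil, or_false,
               ← String.toList_inj, key];
             decide))
      · rw [if_neg h1, if_neg h2] at h; exact absurd h (by simp)

theorem pv_family_none (s : String) (h : s ∉ pvAllKeys) : pvFamily s = none := by
  cases hf : pvFamily s with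
  | none => rfl
  | some f => exact absurd (pv_family_some_mem s f hf) h

theorem pv_loop_false_left (a e : String) (h : a ∉ pvAllKeys) :
    pvNumLoop pvNumericTypes a e = false := by
  simp only [pvAllKeys, List.mem_cons, List.not_mem_nil, or_false, not_or] at h
  obtain ⟨h1,h2,h3,h4,h5,h6,h7,h8,h9,h10,h11,h12,h13⟩ := h
  simp [pvNumLoop, pvNumericTypes, List.contains_eq_mem,
    h1,h2,h3,h4,h5,h6,h7,h8,h9,h10,h11]

theorem pv_loop_false_right (a e : String) (h : e ∉ pvAllKeys) :
    pvNumLoop pvNumericTypes a e = false := by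
  simp only [pvAllKeys, List.mem_cons, List.not_mem_nil, or_false, not_or] at h
  obtain ⟨h1,h2,h3,h4,h5,h6,h7,h8,h9,h10,h11,h12,h13⟩ := h
  simp [pvNumLoop, pvNumericTypes, List.contains_eq_mem,
    h1,h2,h3,h4,h5,h6,h7,h8,h9,h10,h11]

-- both bodies depend only on the lowercased strings; prove their agreement for ALL strings
theorem pv_bodies_agree (a e : String) :
    (if a == e then true
     else if pvNumLoop pvNumericTypes a e then true
     else if (["object", "string"] : List String).contains e
             && (["object", "string"] : List String).contains a then true
     else false)
    =
    (if a == e then true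
     else
       match pvFamily a with
       | none => false
       | some fa => pvFamily e == some fa) := by
  by_cases hae : a = e
  · simp [hae]
  · by_cases ha : a ∈ pvAllKeys
    · by_cases he : e ∈ pvAllKeys
      · fin_cases ha <;> fin_cases he <;> decide
      · have hl := pv_loop_false_right a e he
        have hg := pv_family_none e he
        simp only [pvAllKeys, List.mem_cons, List.not_mem_nil, or_false, not_or] at he
        obtain ⟨h1,h2,h3,h4,h5,h6,h7,h8,h9,h10,h11,h12,h13⟩ := he
        cases hfa : pvFamily a <;> simp [hae, hl, hg, h12, h13]
    · have hl := pv_loop_false_left a e ha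
      have hg := pv_family_none a ha
      simp only [pvAllKeys, List.mem_cons, List.not_mem_nil, or_false, not_or] at ha
      obtain ⟨h1,h2,h3,h4,h5,h6,h7,h8,h9,h10,h11,h12,h13⟩ := ha
      simp [hae, hl, hg, h12, h13]

-- ===== VERDICT (by name: the statement is the Claim_ definition above) =====
theorem dtypes_compatible_py_spec : Claim_equal_dtypes_compatible_py := by
  intro actual expected _
  unfold Spec_dtypes_compatible_py dtypes_compatible_py dtypes_compatible_py_alt
  exact pv_bodies_agree (PySem.Str.lower actual) (PySem.Str.lower expected)
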